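-- pv_equiv track=rewrite | github.com/raopriyam/Leetcode-CTCI-Python | alternatePosNeg.py | alternatePosNeg
-- ===== SOURCE A (Python) =====
-- def alternatePosNeg(arr):
--     pos =0
--     neg = 1
--     ans = []
--     for i in arr:
--         if i>0:
--             ans.insert(pos,i)
--             pos += 2
--         elif i<0:
--             ans.insert(neg,i)
--             neg += 2
--     return ans
-- ===== SOURCE B (Python) =====
-- def alternatePosNeg(arr):
--     pos = [x for x in arr if x > 0]
--     neg = [x for x in arr if x < 0]
--     k = min(len(pos), len(neg))
--     out = [v for pair in zip(pos, neg) for v in pair]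
--     return out + pos[k:] + neg[k:]
-- ===== Notes on version B (the rewrite author's own statement) =====
-- stated objective: faster
-- what changed: Replaces repeated mid-list insert() calls (each O(n)) with a single split into positive/negative sublists followed by one zip-interleave pass plus the leftover tail.
import Mathlib
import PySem

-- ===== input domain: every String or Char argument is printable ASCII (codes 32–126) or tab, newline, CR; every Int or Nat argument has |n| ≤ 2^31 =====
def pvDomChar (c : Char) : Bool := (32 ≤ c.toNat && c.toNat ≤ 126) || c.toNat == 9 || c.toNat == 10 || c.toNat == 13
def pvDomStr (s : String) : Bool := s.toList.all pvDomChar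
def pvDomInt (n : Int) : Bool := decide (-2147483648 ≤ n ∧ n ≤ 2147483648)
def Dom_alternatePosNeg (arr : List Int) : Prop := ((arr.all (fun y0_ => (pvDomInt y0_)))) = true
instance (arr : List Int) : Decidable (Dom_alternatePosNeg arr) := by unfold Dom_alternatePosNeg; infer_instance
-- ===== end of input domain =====

-- B replaces A's repeated mid-list insert() calls with a single split into
-- positive/negative sublists and one zip-interleave pass (objective: faster).

-- ===== PORT A =====
-- state = (pos, neg, ans) exactly as in the Python loop
def alternatePosNeg (arr : List Int) : List Int :=
  (arr.foldl
    (fun (st : Int × Int × List Int) i =>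
      if i > 0 then (st.1 + 2, st.2.1, PySem.List.insert st.2.2 st.1 i)
      else if i < 0 then (st.1, st.2.1 + 2, PySem.List.insert st.2.2 st.2.1 i)
      else st)
    (0, 1, ([] : List Int))).2.2

-- ===== PORT B =====
def alternatePosNeg_alt (arr : List Int) : List Int :=
  let pos := arr.filter (fun x => decide (x > 0))
  let neg := arr.filter (fun x => decide (x < 0))
  let k := min pos.length neg.length
  let out := (pos.zip neg).flatMap (fun pair => [pair.1, pair.2])
  -- pos[k:] / neg[k:] with 0 ≤ k : exact as List.drop k
  out ++ pos.drop k ++ neg.drop k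

-- ===== PRECONDITION & SPEC =====
def Spec_alternatePosNeg (arr : List Int) (out : List Int) : Prop := out = alternatePosNeg_alt arr
instance (arr : List Int) (out : List Int) : Decidable (Spec_alternatePosNeg arr out) := by unfold Spec_alternatePosNeg; infer_instance

-- ===== CLAIM (what is proved, stated in full; the proofs are below) =====
def Claim_equal_alternatePosNeg : Prop := ∀ (arr : List Int), Dom_alternatePosNeg arr → Spec_alternatePosNeg arr (alternatePosNeg arr)

-- ===== LEMMAS AND PROOFS =====

-- mathematical interleaving: alternate until one side runs out, then append the rest
def inter : List Int → List Int → List Int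
  | [], ns => ns
  | p :: ps, [] => p :: ps
  | p :: ps, n :: ns => p :: n :: inter ps ns

theorem inter_nil_right : ∀ (ps : List Int), inter ps [] = ps
  | [] => rfl
  | _ :: _ => rfl

theorem inter_singleton_left (a : Int) : ∀ (ns : List Int), inter [a] ns = a :: ns
  | [] => rfl
  | _ :: _ => rfl

-- Python list.insert clamps an index past the end to an append
theorem insert_ge (xs : List Int) (n : Nat) (h : xs.length ≤ n) (v : Int) :
    PySem.List.insert xs (n : Int) v = xs ++ [v] := by
  simp only [PySem.List.insert, PySem.List.sliceIndices]
  have h0 : ¬((n : Int) < 0) := by omega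
  rw [if_neg h0]
  have : min (n : Int) (xs.length : Int) = (xs.length : Int) := by omega
  simp [this]

theorem insert_cons_succ (x : Int) (xs : List Int) (n : Nat) (v : Int) :
    PySem.List.insert (x :: xs) ((n : Int) + 1) v = x :: PySem.List.insert xs (n : Int) v := by
  by_cases h : n ≤ xs.length
  · have h1 : n + 1 ≤ (x :: xs).length := by simp; omega
    have e1 : ((n : Int) + 1) = ((n + 1 : Nat) : Int) := by push_cast; ring
    rw [e1, PySem.List.insert_natCast _ _ _ h1, PySem.List.insert_natCast _ _ _ h]
    simp [List.take_succ_cons, List.drop_succ_cons]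
  · have h2 : xs.length ≤ n := by omega
    have h3 : (x :: xs).length ≤ n + 1 := by simp; omega
    have e1 : ((n : Int) + 1) = ((n + 1 : Nat) : Int) := by push_cast; ring
    rw [e1, insert_ge _ _ h3, insert_ge _ _ h2]
    simp

-- inserting the next positive at index 2·|ps| extends the positive column
theorem insert_pos : ∀ (ps ns : List Int) (v : Int),
    PySem.List.insert (inter ps ns) ((2 * ps.length : Nat) : Int) v = inter (ps ++ [v]) ns
  | [], ns, v => by
    simp only [List.length_nil, Nat.mul_zero, Nat.cast_zero, PySem.List.insert_zero,
      List.nil_append, inter_singleton_left]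
    rfl
  | a :: ps, [], v => by
    rw [inter_nil_right, inter_nil_right]
    exact insert_ge _ _ (by simp) v
  | a :: ps, b :: ns, v => by
    have e : ((2 * (a :: ps).length : Nat) : Int) = (((2 * ps.length + 1 : Nat) : Int)) + 1 := by
      simp; omega
    rw [e]
    show PySem.List.insert (a :: b :: inter ps ns) _ v = a :: b :: inter (ps ++ [v]) ns
    rw [insert_cons_succ]
    have e2 : ((2 * ps.length + 1 : Nat) : Int) = ((2 * ps.length : Nat) : Int) + 1 := by push_cast; ring
    rw [e2, insert_cons_succ, insert_pos ps ns v]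

-- inserting the next negative at index 2·|ns|+1 extends the negative column
theorem insert_neg : ∀ (ps ns : List Int) (v : Int),
    PySem.List.insert (inter ps ns) ((2 * ns.length + 1 : Nat) : Int) v = inter ps (ns ++ [v])
  | [], [], v => by
    have h := insert_ge [] 1 (by simp) v
    simpa [inter] using h
  | a :: ps, [], v => by
    rw [inter_nil_right]
    show _ = a :: v :: inter ps []
    have e : ((2 * ([] : List Int).length + 1 : Nat) : Int) = ((0 : Nat) : Int) + 1 := by simp
    rw [e, insert_cons_succ]
    simp [PySem.List.insert_zero, inter_nil_right]
  | [], b :: ns, v => by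
    show PySem.List.insert (b :: ns) _ v = b :: ns ++ [v]
    exact insert_ge _ _ (by simp; omega) v
  | a :: ps, b :: ns, v => by
    show PySem.List.insert (a :: b :: inter ps ns) _ v = a :: b :: inter ps (ns ++ [v])
    have e : ((2 * (b :: ns).length + 1 : Nat) : Int) = (((2 * ns.length + 2 : Nat) : Int)) + 1 := by
      simp; omega
    rw [e, insert_cons_succ]
    have e2 : ((2 * ns.length + 2 : Nat) : Int) = ((2 * ns.length + 1 : Nat) : Int) + 1 := by omega
    rw [e2, insert_cons_succ, insert_neg ps ns v]

-- A's loop invariant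
theorem loopA : ∀ (arr ps ns : List Int),
    arr.foldl
      (fun (st : Int × Int × List Int) i =>
        if i > 0 then (st.1 + 2, st.2.1, PySem.List.insert st.2.2 st.1 i)
        else if i < 0 then (st.1, st.2.1 + 2, PySem.List.insert st.2.2 st.2.1 i)
        else st)
      (((2 * ps.length : Nat) : Int), ((2 * ns.length + 1 : Nat) : Int), inter ps ns)
    = (((2 * (ps ++ arr.filter (fun x => decide (x > 0))).length : Nat) : Int),
       ((2 * (ns ++ arr.filter (fun x => decide (x < 0))).length + 1 : Nat) : Int),
       inter (ps ++ arr.filter (fun x => decide (x > 0))) (ns ++ arr.filter (fun x => decide (x < 0))))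
  | [], ps, ns => by simp
  | i :: arr, ps, ns => by
    simp only [List.foldl_cons]
    by_cases hp : i > 0
    · rw [if_pos hp]
      have e : ((2 * ps.length : Nat) : Int) + 2 = ((2 * (ps ++ [i]).length : Nat) : Int) := by
        simp; omega
      have := loopA arr (ps ++ [i]) ns
      simp only [insert_pos, e]
      rw [this]
      have hn : ¬ i < 0 := by omega
      simp [hp, hn]
    · rw [if_neg hp]
      by_cases hn : i < 0
      · rw [if_pos hn]
        have e : ((2 * ns.length + 1 : Nat) : Int) + 2 = ((2 * (ns ++ [i]).length + 1 : Nat) : Int) := by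
          simp; omega
        have := loopA arr ps (ns ++ [i])
        simp only [insert_neg, e]
        rw [this]
        simp [hp, hn]
      · rw [if_neg hn]
        have := loopA arr ps ns
        rw [this]
        have hz : i = 0 := by omega
        simp [hz]

theorem portA_eq_inter (arr : List Int) :
    alternatePosNeg arr
      = inter (arr.filter (fun x => decide (x > 0))) (arr.filter (fun x => decide (x < 0))) := by
  unfold alternatePosNeg
  rw [show ((0 : Int), (1 : Int), ([] : List Int))
        = (((2 * ([] : List Int).length : Nat) : Int),
           ((2 * ([] : List Int).length + 1 : Nat) : Int), inter [] []) by rfl]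
  rw [loopA arr [] []]
  simp

-- B's zip-interleave + leftovers equals inter
theorem portB_eq_inter : ∀ (ps ns : List Int),
    (ps.zip ns).flatMap (fun pair => [pair.1, pair.2])
        ++ ps.drop (min ps.length ns.length) ++ ns.drop (min ps.length ns.length)
      = inter ps ns
  | [], ns => by simp [inter]
  | p :: ps, [] => by simp [inter_nil_right]
  | p :: ps, n :: ns => by
    simp only [List.zip_cons_cons, List.flatMap_cons, List.length_cons]
    have e : min (ps.length + 1) (ns.length + 1) = min ps.length ns.length + 1 := by omega
    rw [e]
    simp only [List.drop_succ_cons]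
    show p :: n :: ((ps.zip ns).flatMap (fun pair => [pair.1, pair.2])
        ++ ps.drop (min ps.length ns.length) ++ ns.drop (min ps.length ns.length)) = _
    rw [portB_eq_inter ps ns]
    rfl

-- ===== VERDICT (by name: the statement is the Claim_ definition above) =====
theorem alternatePosNeg_spec : Claim_equal_alternatePosNeg := by
  intro arr _
  unfold Spec_alternatePosNeg alternatePosNeg_alt
  rw [portA_eq_inter, ← portB_eq_inter]
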